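-- pv_equiv track=rewrite | github.com/aorwall/moatless-tools | moatless/benchmark/utils.py | count_identified_spans
-- ===== SOURCE A (Python) =====
-- def count_identified_spans(
--     expected_files_with_spans: dict[str, list[str]],
--     actual_files_with_spans: dict[str, list[str]],
-- ) -> int:
--     count = 0
--     for actual_file, actual_span_ids in actual_files_with_spans.items():
--         if expected_files_with_spans.get(actual_file, []):
--             for actual_span_id in actual_span_ids:
--                 if actual_span_id in expected_files_with_spans[actual_file]:
--                     count += 1
--     return count
-- ===== SOURCE B (Python) =====
-- def count_identified_spans(
--     expected_files_with_spans: dict[str, list[str]],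
--     actual_files_with_spans: dict[str, list[str]],
-- ) -> int:
--     def per_file(file, actual_span_ids):
--         expected = expected_files_with_spans.get(file, [])
--         if not expected:
--             return 0
--         total = 0
--         seen = set()
--         for sid in expected:
--             if sid not in seen:
--                 seen.add(sid)
--                 total += actual_span_ids.count(sid)
--         return total
--
--     return sum(per_file(f, spans) for f, spans in actual_files_with_spans.items())
-- ===== Notes on version B (the rewrite author's own statement) =====
-- stated objective: alternative
-- what changed: B inverts the inner loop: per file it walks the expected span ids once with an explicit seen-set and adds actual_span_ids.count(sid) for each distinct expected id, and sums per-file results, instead of A's scan of every actual span id with a membership test against the expected list.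
import Mathlib
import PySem

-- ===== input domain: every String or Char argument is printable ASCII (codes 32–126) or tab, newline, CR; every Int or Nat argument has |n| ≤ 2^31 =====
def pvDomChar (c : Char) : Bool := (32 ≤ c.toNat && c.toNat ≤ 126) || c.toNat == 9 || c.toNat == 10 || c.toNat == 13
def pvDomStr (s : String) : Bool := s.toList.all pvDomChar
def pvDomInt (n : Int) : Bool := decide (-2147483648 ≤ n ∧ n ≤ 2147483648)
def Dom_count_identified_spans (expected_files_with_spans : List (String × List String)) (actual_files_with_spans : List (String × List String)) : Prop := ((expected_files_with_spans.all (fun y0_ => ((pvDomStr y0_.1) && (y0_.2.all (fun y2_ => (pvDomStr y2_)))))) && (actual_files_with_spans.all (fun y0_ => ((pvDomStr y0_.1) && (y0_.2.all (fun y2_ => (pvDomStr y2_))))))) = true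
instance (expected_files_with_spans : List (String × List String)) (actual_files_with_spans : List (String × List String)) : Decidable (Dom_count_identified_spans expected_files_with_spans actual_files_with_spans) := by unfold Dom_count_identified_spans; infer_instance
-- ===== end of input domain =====

-- B drives the inner loop by the expected span ids (deduplicated with a seen-set), adding each id's
-- multiplicity in the actual list, and sums per-file results — an alternative decomposition, same cost class.

-- ===== PORT A =====
-- dict.get(k, []) on the association list: first matching key, else the default (shared lookup helper)
def pvDictGet (d : List (String × List String)) (k : String) : List String :=
  ((d.find? (fun p => p.1 == k)).map (·.2)).getD []

def count_identified_spans (expected_files_with_spans : List (String × List String)) (actual_files_with_spans : List (String × List String)) : Int :=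
  actual_files_with_spans.foldl
    (fun count p =>
      let exp := pvDictGet expected_files_with_spans p.1
      if exp ≠ [] then
        -- exp is also expected_files_with_spans[p.1]: the guard guarantees the key is present
        p.2.foldl (fun c s => if s ∈ exp then c + 1 else c) count
      else count)
    0

-- ===== PORT B =====
-- 'for sid in expected: if sid not in seen: seen.add(sid); total += actual_span_ids.count(sid)'
def pvPerFileLoop (spans : List String) (expected : List String) (seen : PySem.Set String) (total : Int) : Int :=
  match expected with
  | [] => total
  | sid :: rest =>
      if PySem.Set.contains seen sid then
        pvPerFileLoop spans rest seen total
      else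
        pvPerFileLoop spans rest (PySem.Set.add seen sid) (total + (PySem.List.count spans sid : Int))

def pvPerFile (expected_files_with_spans : List (String × List String)) (file : String) (actual_span_ids : List String) : Int :=
  let expected := pvDictGet expected_files_with_spans file
  if expected = [] then 0
  else pvPerFileLoop actual_span_ids expected PySem.Set.empty 0

def count_identified_spans_alt (expected_files_with_spans : List (String × List String)) (actual_files_with_spans : List (String × List String)) : Int :=
  (actual_files_with_spans.map (fun p => pvPerFile expected_files_with_spans p.1 p.2)).sum

-- ===== PRECONDITION & SPEC =====
def Spec_count_identified_spans (expected_files_with_spans : List (String × List String)) (actual_files_with_spans : List (String × List String)) (out : Int) : Prop := out = count_identified_spans_alt expected_files_with_spans actual_files_with_spans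
instance (expected_files_with_spans : List (String × List String)) (actual_files_with_spans : List (String × List String)) (out : Int) : Decidable (Spec_count_identified_spans expected_files_with_spans actual_files_with_spans out) := by unfold Spec_count_identified_spans; infer_instance

-- ===== CLAIM =====
def Claim_equal_count_identified_spans : Prop := ∀ (expected_files_with_spans : List (String × List String)) (actual_files_with_spans : List (String × List String)), Dom_count_identified_spans expected_files_with_spans actual_files_with_spans → Spec_count_identified_spans expected_files_with_spans actual_files_with_spans (count_identified_spans expected_files_with_spans actual_files_with_spans)

-- ===== LEMMAS AND PROOFS =====

-- membership in Python's set.add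
theorem pv_mem_add (seen : PySem.Set String) (x s : String) :
    s ∈ PySem.Set.add seen x ↔ s ∈ seen ∨ s = x := by
  unfold PySem.Set.add
  split_ifs with h
  · constructor
    · exact Or.inl
    · rintro (hs | rfl)
      · exact hs
      · simpa using h
  · simp

-- splitting off one fresh key: counting members of sid::rest (avoiding seen) = count of sid plus members of rest (avoiding seen+sid)
theorem pv_countP_split (spans : List String) (sid : String) (rest : List String)
    (seen : PySem.Set String) (hsid : sid ∉ seen) :
    spans.countP (fun s => decide (s ∈ sid :: rest) && !decide (s ∈ seen))
      = spans.count sid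
        + spans.countP (fun s => decide (s ∈ rest) && !decide (s ∈ PySem.Set.add seen sid)) := by
  induction spans with
  | nil => simp
  | cons a tl ih =>
    simp only [List.countP_cons, List.count_cons, ih]
    by_cases ha : a = sid
    · subst ha
      simp [hsid]
      omega
    · have hmem : (a ∈ PySem.Set.add seen sid) ↔ a ∈ seen := by
        rw [pv_mem_add]; simp [ha]
      have hbeq : (a == sid) = false := by simp [ha]
      simp only [List.mem_cons, ha, false_or, hmem, hbeq, Bool.false_eq_true, if_false]
      split_ifs <;> omega

-- the seen-set loop counts, with multiplicity in spans, the elements of `expected` outside `seen`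
theorem pv_loop_eq_countP (spans : List String) (expected : List String)
    (seen : PySem.Set String) (total : Int) :
    pvPerFileLoop spans expected seen total
      = total + (spans.countP (fun s => decide (s ∈ expected) && !decide (s ∈ seen)) : Int) := by
  induction expected generalizing seen total with
  | nil => simp [pvPerFileLoop]
  | cons sid rest ih =>
    unfold pvPerFileLoop
    have hc : PySem.Set.contains seen sid = decide (sid ∈ seen) := by
      simp only [PySem.Set.contains_eq_listContains, List.contains_eq_mem]
    rw [hc]
    by_cases h : sid ∈ seen
    · rw [if_pos (by simp [h]), ih]
      have : spans.countP (fun s => decide (s ∈ sid :: rest) && !decide (s ∈ seen))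
          = spans.countP (fun s => decide (s ∈ rest) && !decide (s ∈ seen)) := by
        apply List.countP_congr
        intro s _
        by_cases hs : s = sid
        · subst hs; simp [h]
        · simp [hs]
      rw [this]
    · rw [if_neg (by simp [h]), ih, pv_countP_split spans sid rest seen h]
      simp only [PySem.List.count_eq]
      push_cast
      ring

-- per file: B's loop from an empty seen-set = A's inner membership count
theorem pv_perfile_eq (spans expected : List String) :
    pvPerFileLoop spans expected PySem.Set.empty 0
      = (spans.countP (fun s => decide (s ∈ expected)) : Int) := by
  rw [pv_loop_eq_countP]
  simp [PySem.Set.empty]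

-- ===== VERDICT =====
theorem count_identified_spans_spec : Claim_equal_count_identified_spans := by
  intro e a hd
  clear hd
  unfold Spec_count_identified_spans count_identified_spans count_identified_spans_alt
  induction a using List.reverseRecOn with
  | nil => simp
  | append_singleton xs p ih =>
    rw [List.foldl_append, List.map_append, List.sum_append, List.foldl_cons, List.foldl_nil,
        List.map_cons, List.map_nil, List.sum_cons, List.sum_nil, ← ih]
    simp only [pvPerFile]
    by_cases h : pvDictGet e p.1 = []
    · simp [h]
    · rw [if_neg h]
      simp only [ne_eq, h, not_false_eq_true, if_true]
      rw [PySem.List.foldl_ite_add_one, pv_perfile_eq]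
      ring
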